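-- pv_equiv track=rewrite | github.com/robkay01/ownyourmind | tools/extract-voice-samples.py | strip_email_headers
-- ===== SOURCE A (Python) =====
-- def strip_email_headers(body: str) -> str:
--     """Remove embedded email headers (Received:, ARC-*, DKIM-*, etc.) from body."""
--     lines = body.split("\n")
--     clean_lines = []
--     skip_header = False
--     header_patterns = (
--         "Received:", "ARC-", "DKIM-", "Authentication-Results",
--         "Received-SPF:", "MIME-Version:",
--         "Message-ID:", "In-Reply-To:", "References:", "Thread-",
--         "Return-Path:", "Delivered-To:",
--         "Content-Type:", "Content-Transfer-Encoding:",
--         # Catch all X- headers (spam filters, tracking, org metadata)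
--         "X-",
--     )
--     for line in lines:
--         stripped = line.strip()
--         # Detect header lines (key: value at start of line, or continuation with whitespace)
--         if any(stripped.startswith(p) for p in header_patterns):
--             skip_header = True
--             continue
--         # Header continuation lines start with whitespace
--         if skip_header and line and line[0] in (" ", "\t"):
--             continue
--         # Non-header line
--         skip_header = False
--         clean_lines.append(line)
--     return "\n".join(clean_lines)
-- ===== SOURCE B (Python) =====
-- _HEADER_PATTERNS = (
--     "Received:", "ARC-", "DKIM-", "Authentication-Results",
--     "Received-SPF:", "MIME-Version:",
--     "Message-ID:", "In-Reply-To:", "References:", "Thread-",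
--     "Return-Path:", "Delivered-To:",
--     "Content-Type:", "Content-Transfer-Encoding:",
--     "X-",
-- )
--
-- def strip_email_headers(body: str) -> str:
--     # Right-to-left pass: buffer continuation lines until the line *above* them
--     # is seen, which decides whether the buffered block is kept or dropped.
--     lines = body.split("\n")
--     kept_rev = []      # kept lines, in reverse order
--     pending_rev = []   # whitespace-continuation lines awaiting their owner, reversed
--     for line in reversed(lines):
--         stripped = line.strip()
--         if any(stripped.startswith(p) for p in _HEADER_PATTERNS):
--             pending_rev = []          # block belonged to a header: drop it
--         elif line and line[0] in (" ", "\t"):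
--             pending_rev.append(line)  # fate unknown yet
--         else:
--             kept_rev.extend(pending_rev)  # block belonged to a normal line: keep
--             kept_rev.append(line)
--             pending_rev = []
--     kept_rev.extend(pending_rev)      # leading continuations have no owner: keep
--     return "\n".join(reversed(kept_rev))
-- ===== Notes on version B (the rewrite author's own statement) =====
-- stated objective: alternative
-- what changed: Replaces A's forward single-pass skip_header flag state machine with a right-to-left traversal that buffers whitespace-continuation lines and decides the whole buffered block's fate (keep or drop) only when the line above it is classified, building the output back-to-front.
import Mathlib
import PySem

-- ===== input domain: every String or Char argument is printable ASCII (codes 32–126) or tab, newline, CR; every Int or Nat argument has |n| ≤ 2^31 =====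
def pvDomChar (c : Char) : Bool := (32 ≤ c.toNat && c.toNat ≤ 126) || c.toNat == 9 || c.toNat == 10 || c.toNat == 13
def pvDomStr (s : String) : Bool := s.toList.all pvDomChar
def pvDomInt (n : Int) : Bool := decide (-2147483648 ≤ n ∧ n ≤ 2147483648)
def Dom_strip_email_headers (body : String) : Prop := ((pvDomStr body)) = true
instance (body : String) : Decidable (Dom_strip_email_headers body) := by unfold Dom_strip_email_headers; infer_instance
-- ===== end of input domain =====

-- B replaces A's forward skip_header state machine by a right-to-left pass that
-- buffers continuation lines until the line above them decides their fate
-- (objective: alternative decomposition, same O(n) cost).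

-- shared by both ports: the header-pattern tuple and the two line tests both
-- Pythons perform verbatim
def pvHeaderPatterns : List String :=
  ["Received:", "ARC-", "DKIM-", "Authentication-Results",
   "Received-SPF:", "MIME-Version:",
   "Message-ID:", "In-Reply-To:", "References:", "Thread-",
   "Return-Path:", "Delivered-To:",
   "Content-Type:", "Content-Transfer-Encoding:",
   "X-"]

-- any(stripped.startswith(p) for p in header_patterns), stripped = line.strip()
def pvIsHeader (line : String) : Bool :=
  pvHeaderPatterns.any (fun p => PySem.Str.startswith (PySem.Str.strip line) p)

-- line and line[0] in (" ", "\t")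
def pvIsCont (line : String) : Bool :=
  match line.toList with
  | [] => false
  | c :: _ => c == ' ' || c == '\t'

-- ===== PORT A =====
-- one for-loop step over state (skip_header, clean_lines)
def pvAStep (st : Bool × List String) (line : String) : Bool × List String :=
  if pvIsHeader line then (true, st.2)
  else if st.1 && pvIsCont line then st
  else (false, st.2 ++ [line])

def strip_email_headers (body : String) : String :=
  let lines := (PySem.Str.split? body "\n").getD []
  PySem.Str.join "\n" (lines.foldl pvAStep (false, [])).2

-- ===== PORT B =====
-- one reversed-loop step over state (kept_rev, pending_rev)
def pvBStep (st : List String × List String) (line : String) : List String × List String :=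
  if pvIsHeader line then (st.1, [])
  else if pvIsCont line then (st.1, st.2 ++ [line])
  else (st.1 ++ st.2 ++ [line], [])

def strip_email_headers_alt (body : String) : String :=
  let lines := (PySem.Str.split? body "\n").getD []
  let st := lines.reverse.foldl pvBStep ([], [])
  PySem.Str.join "\n" (st.1 ++ st.2).reverse

-- ===== PRECONDITION & SPEC =====
def Spec_strip_email_headers (body : String) (out : String) : Prop := out = strip_email_headers_alt body
instance (body : String) (out : String) : Decidable (Spec_strip_email_headers body out) := by unfold Spec_strip_email_headers; infer_instance

-- ===== CLAIM (what is proved, stated in full; the proofs are below) =====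
def Claim_equal_strip_email_headers : Prop := ∀ (body : String), Dom_strip_email_headers body → Spec_strip_email_headers body (strip_email_headers body)

-- ===== LEMMAS AND PROOFS =====
-- common characterization: (kept-after-the-leading-continuation-block, that block)
def pvGo : List String → List String × List String
  | [] => ([], [])
  | l :: rest =>
    let st := pvGo rest
    if pvIsHeader l then (st.1, [])
    else if pvIsCont l then (st.1, l :: st.2)
    else (l :: st.2 ++ st.1, [])

theorem pvA_eq_go (lines : List String) : ∀ (acc : List String),
    (lines.foldl pvAStep (false, acc)).2 = acc ++ (pvGo lines).2 ++ (pvGo lines).1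
    ∧ (lines.foldl pvAStep (true, acc)).2 = acc ++ (pvGo lines).1 := by
  induction lines with
  | nil => intro acc; simp [pvGo]
  | cons l rest ih =>
    intro acc
    by_cases hh : pvIsHeader l
    · simp [pvAStep, hh, pvGo, ih]
    · by_cases hc : pvIsCont l
      · simp [pvAStep, hh, hc, pvGo, ih]
      · simp [pvAStep, hh, hc, pvGo, ih]

theorem pvB_eq_go (lines : List String) :
    lines.reverse.foldl pvBStep ([], []) = ((pvGo lines).1.reverse, (pvGo lines).2.reverse) := by
  rw [List.foldl_reverse]
  induction lines with
  | nil => simp [pvGo]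
  | cons l rest ih =>
    rw [List.foldr_cons, ih]
    by_cases hh : pvIsHeader l
    · simp [pvBStep, hh, pvGo]
    · by_cases hc : pvIsCont l
      · simp [pvBStep, hh, hc, pvGo]
      · simp [pvBStep, hh, hc, pvGo]

-- ===== VERDICT (by name: the statement is the Claim_ definition above) =====
theorem strip_email_headers_spec : Claim_equal_strip_email_headers := by
  intro body _
  unfold Spec_strip_email_headers strip_email_headers strip_email_headers_alt
  dsimp only
  rw [pvB_eq_go, (pvA_eq_go _ []).1]
  simp
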